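-- pv_equiv track=rewrite | github.com/mayowa2133/AI_Agent_Leads_Revenue | src/signal_engine/enrichment/regulatory_matcher.py | _code_matches
-- ===== SOURCE A (Python) =====
-- def _code_matches(permit_type: str, update_codes: list[str]) -> bool:
--     """
--     Check if permit type matches any applicable codes in update.
--
--     Args:
--         permit_type: Permit type (e.g., "Fire Alarm", "Sprinkler")
--         update_codes: List of applicable codes (e.g., ["NFPA 72", "NFPA 101"])
--
--     Returns:
--         True if there's a match
--     """
--     if not permit_type or not update_codes:
--         return False
--
--     permit_type_lower = permit_type.lower()
--
--     # Check if permit type contains code keywords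
--     code_keywords = ["fire alarm", "sprinkler", "hvac", "fire suppression", "fire safety"]
--
--     for keyword in code_keywords:
--         if keyword in permit_type_lower:
--             # Check if any update code is relevant
--             for code in update_codes:
--                 if not code:
--                     continue
--                 code_lower = code.lower()
--
--                 # Match NFPA codes
--                 if "nfpa" in code_lower and ("fire" in permit_type_lower or "sprinkler" in permit_type_lower):
--                     return True
--
--                 # Match EPA codes for HVAC
--                 if "epa" in code_lower and "hvac" in permit_type_lower:
--                     return True
--
--     return False
-- ===== SOURCE B (Python) =====
-- def _code_matches(permit_type: str, update_codes: list[str]) -> bool: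
--     if not permit_type or not update_codes:
--         return False
--
--     pt = permit_type.lower()
--
--     # Compile the permit type into the set of regulatory markers it licenses.
--     markers = []
--     if any(k in pt for k in ("fire alarm", "sprinkler", "hvac",
--                              "fire suppression", "fire safety")):
--         if "fire" in pt or "sprinkler" in pt:
--             markers.append("nfpa")
--         if "hvac" in pt:
--             markers.append("epa")
--
--     # A code matches iff it contains one of the licensed markers.
--     # (An empty code contains no marker, so no explicit skip is needed.)
--     return any(m in code.lower() for code in update_codes for m in markers)
-- ===== Notes on version B (the rewrite author's own statement) =====
-- stated objective: alternative
-- what changed: B compiles the permit type once into the list of licensed code markers ('nfpa'/'epa') and then matches codes against that marker list in one generic substring scan, instead of A's keyword loop that rescans the code list with hard-coded per-code branch conditions; the empty-code skip disappears since no marker is a substring of an empty code.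
import Mathlib
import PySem

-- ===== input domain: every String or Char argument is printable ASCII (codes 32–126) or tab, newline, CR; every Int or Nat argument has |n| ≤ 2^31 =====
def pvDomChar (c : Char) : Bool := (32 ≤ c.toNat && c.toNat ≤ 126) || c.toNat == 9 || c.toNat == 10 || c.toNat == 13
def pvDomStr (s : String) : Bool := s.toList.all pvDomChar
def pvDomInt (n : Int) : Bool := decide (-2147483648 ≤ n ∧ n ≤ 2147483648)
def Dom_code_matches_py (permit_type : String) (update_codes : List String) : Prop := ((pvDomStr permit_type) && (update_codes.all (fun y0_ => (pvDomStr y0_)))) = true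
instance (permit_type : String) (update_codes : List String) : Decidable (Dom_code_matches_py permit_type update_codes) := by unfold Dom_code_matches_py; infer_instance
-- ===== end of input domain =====

-- B compiles the permit type once into the list of licensed markers ("nfpa"/"epa")
-- and then matches codes against that marker list in one generic substring scan,
-- replacing A's keyword loop with hard-coded per-code branches — alternative decomposition.

-- ===== PORT A =====
-- inner loop of A: for code in update_codes (with continue on empty code, early return True)
def pvInnerA (ptl : String) : List String → Bool
  | [] => false
  | code :: rest =>
    if code = "" then pvInnerA ptl rest
    else
      let cl := PySem.Str.lower code
      if PySem.Str.isIn "nfpa" cl && (PySem.Str.isIn "fire" ptl || PySem.Str.isIn "sprinkler" ptl) then true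
      else if PySem.Str.isIn "epa" cl && PySem.Str.isIn "hvac" ptl then true
      else pvInnerA ptl rest

-- outer loop of A: for keyword in code_keywords
def pvOuterA (ptl : String) (codes : List String) : List String → Bool
  | [] => false
  | kw :: rest =>
    if PySem.Str.isIn kw ptl then
      if pvInnerA ptl codes then true else pvOuterA ptl codes rest
    else pvOuterA ptl codes rest

def code_matches_py (permit_type : String) (update_codes : List String) : Bool :=
  if permit_type = "" ∨ update_codes = [] then false
  else
    let ptl := PySem.Str.lower permit_type
    pvOuterA ptl update_codes ["fire alarm", "sprinkler", "hvac", "fire suppression", "fire safety"]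

-- ===== PORT B =====
-- the marker list B compiles from the permit type
def pvMarkers (ptl : String) : List String :=
  if (["fire alarm", "sprinkler", "hvac", "fire suppression", "fire safety"]).any
      (fun k => PySem.Str.isIn k ptl) then
    (if PySem.Str.isIn "fire" ptl || PySem.Str.isIn "sprinkler" ptl then ["nfpa"] else []) ++
    (if PySem.Str.isIn "hvac" ptl then ["epa"] else [])
  else []

def code_matches_py_alt (permit_type : String) (update_codes : List String) : Bool :=
  if permit_type = "" ∨ update_codes = [] then false
  else
    let markers := pvMarkers (PySem.Str.lower permit_type)
    update_codes.any (fun code => markers.any (fun m => PySem.Str.isIn m (PySem.Str.lower code)))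

-- ===== PRECONDITION & SPEC =====
def Spec_code_matches_py (permit_type : String) (update_codes : List String) (out : Bool) : Prop := out = code_matches_py_alt permit_type update_codes
instance (permit_type : String) (update_codes : List String) (out : Bool) : Decidable (Spec_code_matches_py permit_type update_codes out) := by unfold Spec_code_matches_py; infer_instance

-- ===== CLAIM (what is proved, stated in full; the proofs are below) =====
def Claim_equal_code_matches_py : Prop := ∀ (permit_type : String) (update_codes : List String), Dom_code_matches_py permit_type update_codes → Spec_code_matches_py permit_type update_codes (code_matches_py permit_type update_codes)

-- ===== LEMMAS AND PROOFS =====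

-- A's inner loop as a flat any over the codes
theorem pvInnerA_eq_any (ptl : String) (codes : List String) :
    pvInnerA ptl codes = codes.any (fun code =>
      decide (code ≠ "") &&
        ((PySem.Str.isIn "nfpa" (PySem.Str.lower code)
            && (PySem.Str.isIn "fire" ptl || PySem.Str.isIn "sprinkler" ptl))
          || (PySem.Str.isIn "epa" (PySem.Str.lower code) && PySem.Str.isIn "hvac" ptl))) := by
  induction codes with
  | nil => rfl
  | cons c rest ih =>
    simp only [pvInnerA, List.any_cons, ih]
    by_cases hc : c = "" <;> simp [hc, Bool.or_assoc]

-- A's outer loop: keyword presence && inner scan (the inner scan ignores the keyword)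
theorem pvOuterA_eq (ptl : String) (codes : List String) (kws : List String) :
    pvOuterA ptl codes kws
      = (kws.any (fun kw => PySem.Str.isIn kw ptl) && pvInnerA ptl codes) := by
  induction kws with
  | nil => rfl
  | cons kw rest ih =>
    simp only [pvOuterA, List.any_cons, ih]
    split_ifs with h1 h2
    · simp [h2]; exact Or.inl (by simpa using h1)
    · simp only [Bool.not_eq_true] at h2; simp [h2]
    · simp only [Bool.not_eq_true] at h1
      have h1' : PySem.Chars.isIn kw.toList ptl.toList = false := by simpa using h1
      simp [h1']

-- push a constant conjunct inside List.any
theorem any_and_left {α : Type} (b : Bool) (l : List α) (f : α → Bool) :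
    (b && l.any f) = l.any (fun x => b && f x) := by
  cases b <;> simp

-- per-code: searching the compiled markers equals A's hard-coded branch conditions guarded by keyword presence
theorem markers_match (ptl c : String) :
    (pvMarkers ptl).any (fun m => PySem.Str.isIn m (PySem.Str.lower c))
      = ((["fire alarm", "sprinkler", "hvac", "fire suppression", "fire safety"]).any
            (fun k => PySem.Str.isIn k ptl)
          && (decide (c ≠ "") &&
            ((PySem.Str.isIn "nfpa" (PySem.Str.lower c)
                && (PySem.Str.isIn "fire" ptl || PySem.Str.isIn "sprinkler" ptl))
              || (PySem.Str.isIn "epa" (PySem.Str.lower c) && PySem.Str.isIn "hvac" ptl)))) := by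
  unfold pvMarkers
  by_cases hc : c = ""
  · subst hc
    split_ifs <;> simp [PySem.Str.lower, PySem.Chars.lower] <;> decide
  · split_ifs with hK hF hH hH
    · rw [hK, hF, hH]; simp [hc]
    · simp only [Bool.not_eq_true] at hH; rw [hK, hF, hH]; simp [hc]
    · simp only [Bool.not_eq_true] at hF; rw [hK, hF, hH]; simp [hc]
    · simp only [Bool.not_eq_true] at hF hH; rw [hK, hF, hH]; simp
    · simp only [Bool.not_eq_true] at hK; rw [hK]; simp

-- ===== VERDICT (by name: the statement is the Claim_ definition above) =====
theorem code_matches_py_spec : Claim_equal_code_matches_py := by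
  intro permit_type update_codes _
  unfold Spec_code_matches_py code_matches_py code_matches_py_alt
  split_ifs with h
  · rfl
  · simp only [pvOuterA_eq, pvInnerA_eq_any, any_and_left, markers_match]
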